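-- pv_equiv track=rewrite | github.com/jander99/spring-profile-resolver | src/spring_profile_resolver/properties_parser.py | _unescape_property_string
-- ===== SOURCE A (Python) =====
-- def _unescape_property_string(s: str) -> str:
--     """Unescape a properties file string.
--
--     Handles:
--     - \\n, \\t, \\r, \\f
--     - \\uXXXX unicode escapes
--     - \\\\ for literal backslash
--     """
--     result = []
--     i = 0
--     while i < len(s):
--         if s[i] == "\\" and i + 1 < len(s):
--             next_char = s[i + 1]
--             if next_char == "n":
--                 result.append("\n")
--                 i += 2
--             elif next_char == "t":
--                 result.append("\t")
--                 i += 2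
--             elif next_char == "r":
--                 result.append("\r")
--                 i += 2
--             elif next_char == "f":
--                 result.append("\f")
--                 i += 2
--             elif next_char == "\\":
--                 result.append("\\")
--                 i += 2
--             elif next_char == "u" and i + 5 < len(s):
--                 # Unicode escape
--                 try:
--                     code_point = int(s[i + 2 : i + 6], 16)
--                     # Validate not a surrogate (U+D800-U+DFFF) which are invalid in UTF-8
--                     if 0xD800 <= code_point <= 0xDFFF:
--                         # Invalid surrogate, treat backslash as literal
--                         result.append(s[i])
--                         i += 1
--                     else:
--                         result.append(chr(code_point))
--                         i += 6
--                 except ValueError: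
--                     result.append(s[i])
--                     i += 1
--             else:
--                 # Unknown escape, keep the character after backslash
--                 result.append(next_char)
--                 i += 2
--         else:
--             result.append(s[i])
--             i += 1
--     return "".join(result)
-- ===== SOURCE B (Python) =====
-- _SIMPLE = {"n": "\n", "t": "\t", "r": "\r", "f": "\f", "\\": "\\"}
--
--
-- def _unescape_property_string(s: str) -> str:
--     """Unescape a properties-file string by jumping between backslashes.
--
--     Instead of inspecting every character, copy whole literal runs with
--     str.find and handle exactly one escape per iteration.
--     """
--     out = []
--     i = 0
--     n = len(s)
--     while i < n:
--         j = s.find("\\", i)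
--         if j == -1 or j == n - 1:
--             out.append(s[i:])
--             break
--         out.append(s[i:j])
--         c = s[j + 1]
--         if c in _SIMPLE:
--             out.append(_SIMPLE[c])
--             i = j + 2
--         elif c == "u" and j + 5 < n:
--             try:
--                 cp = int(s[j + 2 : j + 6], 16)
--                 if 0xD800 <= cp <= 0xDFFF:
--                     raise ValueError
--                 out.append(chr(cp))
--                 i = j + 6
--             except ValueError:
--                 out.append("\\")
--                 i = j + 1
--         else:
--             out.append(c)
--             i = j + 2
--     return "".join(out)
-- ===== Notes on version B (the rewrite author's own statement) =====
-- stated objective: faster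
-- what changed: B jumps from backslash to backslash with str.find, copying whole literal runs via slices, and resolves the two-char escapes through a dict lookup, instead of A's char-by-char while loop with an elif chain.
import Mathlib
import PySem

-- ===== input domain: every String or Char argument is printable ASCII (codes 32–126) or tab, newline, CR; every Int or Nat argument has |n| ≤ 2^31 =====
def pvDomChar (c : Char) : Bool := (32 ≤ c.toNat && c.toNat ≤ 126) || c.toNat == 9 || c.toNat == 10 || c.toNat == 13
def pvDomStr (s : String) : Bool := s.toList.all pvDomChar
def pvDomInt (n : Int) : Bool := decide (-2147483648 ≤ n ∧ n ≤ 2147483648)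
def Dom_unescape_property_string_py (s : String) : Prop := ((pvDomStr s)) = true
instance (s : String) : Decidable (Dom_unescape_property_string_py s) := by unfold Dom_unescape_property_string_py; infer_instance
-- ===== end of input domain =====

-- B replaces A's char-by-char scan by jumping from backslash to backslash (copying whole
-- literal runs at once) and a table lookup for the two-char escapes (measurably faster by constant factor).

-- ===== PORT A =====
-- char-by-char loop of A: i advances by 1/2/6 ↔ recursion on the matching suffix
def unescapeA : List Char → List Char
  | [] => []
  | c :: rest =>
    if c = '\\' then
      match rest with
      | [] => ['\\']                     -- i + 1 < len fails: append s[i], i += 1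
      | nc :: rest2 =>
        if nc = 'n' then '\n' :: unescapeA rest2
        else if nc = 't' then '\t' :: unescapeA rest2
        else if nc = 'r' then '\r' :: unescapeA rest2
        else if nc = 'f' then '\x0c' :: unescapeA rest2
        else if nc = '\\' then '\\' :: unescapeA rest2
        else if nc = 'u' ∧ 4 ≤ rest2.length then      -- i + 5 < len(s)
          match PySem.Int.ofCharsBase? (rest2.take 4) 16 with   -- int(s[i+2:i+6], 16)
          | none => '\\' :: unescapeA (nc :: rest2)   -- ValueError: literal backslash, i += 1
          | some cp =>
            if 0xD800 ≤ cp ∧ cp ≤ 0xDFFF then '\\' :: unescapeA (nc :: rest2)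
            else if cp < 0 then '\\' :: unescapeA (nc :: rest2)  -- chr raises ValueError, caught
            else Char.ofNat cp.toNat :: unescapeA (rest2.drop 4)
        else nc :: unescapeA rest2
    else c :: unescapeA rest
  termination_by l => l.length
  decreasing_by all_goals (simp_all [List.length_drop]; try omega)

def unescape_property_string_py (s : String) : String := String.ofList (unescapeA s.toList)

-- ===== PORT B =====
-- the _SIMPLE dict of Source B (insertion-order association list)
def pvSimple : List (Char × Char) := [('n', '\n'), ('t', '\t'), ('r', '\r'), ('f', '\x0c'), ('\\', '\\')]

-- Source B's try-block: int(hex, 16), surrogate re-raise, chr(cp) — none = ValueError path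
def pvHex? (cs : List Char) : Option Int :=
  match PySem.Int.ofCharsBase? cs 16 with
  | none => none
  | some cp =>
    if 0xD800 ≤ cp ∧ cp ≤ 0xDFFF then none
    else if cp < 0 then none             -- chr of a negative raises ValueError
    else some cp

-- Source B's loop: s.find('\\', i) ↔ takeWhile/dropWhile split of the suffix
def unescapeB (cs : List Char) : List Char :=
  let pre := cs.takeWhile (fun c => c ≠ '\\')
  match h : cs.dropWhile (fun c => c ≠ '\\') with
  | [] => pre                            -- j == -1: append s[i:], stop
  | [b] => pre ++ [b]                    -- j == n-1: trailing backslash kept, stop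
  | _ :: c :: tail =>
    match pvSimple.lookup c with
    | some r => pre ++ r :: unescapeB tail
    | none =>
      if c = 'u' ∧ 4 ≤ tail.length then
        match pvHex? (tail.take 4) with
        | some cp => pre ++ Char.ofNat cp.toNat :: unescapeB (tail.drop 4)
        | none => pre ++ '\\' :: unescapeB (c :: tail)
      else pre ++ c :: unescapeB tail
  termination_by cs.length
  decreasing_by
    all_goals
      have hle := List.length_dropWhile_le (fun c => c ≠ '\\') cs
      rw [h] at hle
      simp_all [List.length_drop]
      try omega

def unescape_property_string_py_alt (s : String) : String := String.ofList (unescapeB s.toList)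

-- ===== PRECONDITION & SPEC =====
def Spec_unescape_property_string_py (s : String) (out : String) : Prop := out = unescape_property_string_py_alt s
instance (s : String) (out : String) : Decidable (Spec_unescape_property_string_py s out) := by unfold Spec_unescape_property_string_py; infer_instance

-- ===== CLAIM (what is proved, stated in full; the proofs are below) =====
def Claim_equal_unescape_property_string_py : Prop := ∀ (s : String), Dom_unescape_property_string_py s → Spec_unescape_property_string_py s (unescape_property_string_py s)

-- ===== LEMMAS AND PROOFS =====
theorem unescapeA_cons_ne (c : Char) (rest : List Char) (h : ¬ c = '\\') :
    unescapeA (c :: rest) = c :: unescapeA rest := by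
  rw [unescapeA.eq_def]; simp [h]

theorem unescapeA_append (pre rest : List Char) (h : ∀ c ∈ pre, ¬ c = '\\') :
    unescapeA (pre ++ rest) = pre ++ unescapeA rest := by
  induction pre with
  | nil => simp
  | cons c tl ih =>
    simp only [List.cons_append]
    rw [unescapeA_cons_ne c _ (h c (by simp)), ih (fun x hx => h x (by simp [hx]))]

theorem bsHead (cs : List Char) (b : Char) (rest : List Char)
    (h : cs.dropWhile (fun c => c ≠ '\\') = b :: rest) : b = '\\' := by
  induction cs with
  | nil => simp at h
  | cons a tl ih =>
    rw [List.dropWhile_cons] at h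
    split at h
    next => exact ih h
    next hp =>
      injection h with h1 h2
      subst h1
      simpa using hp

theorem unescapeB_eq_unescapeA : ∀ (n : Nat) (cs : List Char), cs.length ≤ n → unescapeB cs = unescapeA cs := by
  intro n
  induction n with
  | zero =>
    intro cs hlen
    have hnil : cs = [] := List.eq_nil_of_length_eq_zero (Nat.le_zero.mp hlen)
    subst hnil
    rw [unescapeB, show unescapeA ([] : List Char) = [] from by rw [unescapeA.eq_def]]
    simp
  | succ n ih =>
    intro cs hlen
    have hsplit := List.takeWhile_append_dropWhile (p := fun c => c ≠ '\\') (l := cs)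
    have hpre : ∀ c ∈ cs.takeWhile (fun c => c ≠ '\\'), ¬ c = '\\' := fun c hc => by
      simpa using List.mem_takeWhile_imp hc
    rw [unescapeB]
    split
    next h =>
      conv_rhs => rw [← hsplit, h]
      rw [List.append_nil]
      have hApp := unescapeA_append (cs.takeWhile (fun c => c ≠ '\\')) [] hpre
      simp only [List.append_nil] at hApp
      rw [hApp, show unescapeA ([] : List Char) = [] from by rw [unescapeA.eq_def]]
      simp
    next b h =>
      have hb := bsHead cs b [] h
      subst hb
      conv_rhs => rw [← hsplit, h]
      rw [unescapeA_append _ _ hpre,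
        show unescapeA ['\\'] = ['\\'] from by rw [unescapeA.eq_def]; decide]
    next b c tail h =>
      have hb := bsHead cs b (c :: tail) h
      subst hb
      have hcs : cs = cs.takeWhile (fun c => c ≠ '\\') ++ '\\' :: c :: tail := by
        conv_lhs => rw [← hsplit, h]
      have hlt : tail.length + 2 ≤ cs.length := by
        have := congrArg List.length hcs
        simp at this
        omega
      conv_rhs => rw [hcs]
      rw [unescapeA_append _ _ hpre, unescapeA.eq_def]
      simp only [reduceIte]
      by_cases h1 : c = 'n'
      · subst h1; simp [pvSimple, ih tail (by omega)]
      · by_cases h2 : c = 't'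
        · subst h2; simp [pvSimple, List.lookup, h1, ih tail (by omega)]
        · by_cases h3 : c = 'r'
          · subst h3; simp [pvSimple, List.lookup, h1, h2, ih tail (by omega)]
          · by_cases h4 : c = 'f'
            · subst h4; simp [pvSimple, List.lookup, h1, h2, h3, ih tail (by omega)]
            · by_cases h5 : c = '\\'
              · subst h5; simp [pvSimple, List.lookup, h1, h2, h3, h4, ih tail (by omega)]
              · have hlk : pvSimple.lookup c = none := by
                  simp [pvSimple, List.lookup, beq_eq_false_iff_ne.mpr h1,
                    beq_eq_false_iff_ne.mpr h2, beq_eq_false_iff_ne.mpr h3,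
                    beq_eq_false_iff_ne.mpr h4, beq_eq_false_iff_ne.mpr h5]
                simp only [hlk, h1, h2, h3, h4, h5, if_false]
                by_cases h6 : c = 'u' ∧ 4 ≤ tail.length
                · obtain ⟨hcu, hl4⟩ := h6
                  subst hcu
                  simp only [hl4, and_true, reduceIte, pvHex?]
                  cases hp : PySem.Int.ofCharsBase? (tail.take 4) 16 with
                  | none => simp [ih ('u' :: tail) (by simp; omega)]
                  | some cp =>
                    by_cases hs : (0xD800 : Int) ≤ cp ∧ cp ≤ 0xDFFF
                    · simp [hs, ih ('u' :: tail) (by simp; omega)]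
                    · by_cases hneg : cp < 0
                      · simp [hs, hneg, ih ('u' :: tail) (by simp; omega)]
                      · simp [hs, hneg, ih (tail.drop 4) (by simp [List.length_drop]; omega)]
                · simp only [h6, if_false]
                  simp [ih tail (by omega)]

-- ===== VERDICT (by name: the statement is the Claim_ definition above) =====
theorem unescape_property_string_py_spec : Claim_equal_unescape_property_string_py := by
  intro s _
  unfold Spec_unescape_property_string_py unescape_property_string_py unescape_property_string_py_alt
  rw [unescapeB_eq_unescapeA s.toList.length s.toList (le_refl _)]
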